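-- pv_equiv track=rewrite | github.com/cangermueller/deepcpg | predict/utils.py | ranges_to_list
-- ===== SOURCE A (Python) =====
-- def ranges_to_list(x, start=0, stop=None):
--     s = set()
--     for xi in x:
--         xi = str(xi)
--         if xi.find('-') >= 0:
--             t = xi.split('-')
--             if len(t) != 2:
--                 raise ValueError('Invalid range!')
--             if len(t[0]) == 0:
--                 t[0] = start
--             if len(t[1]) == 0:
--                 t[1] = stop
--             s |= set(range(int(t[0]), int(t[1]) + 1))
--         else:
--             s.add(int(xi))
--     s = sorted(list(s))
--     return s
-- ===== SOURCE B (Python) =====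
-- # Alternative: parse each token into an ascending run (singleton or range),
-- # k-way merge the sorted runs, then drop adjacent duplicates in one pass.
-- def _merge2(a, b):
--     i = 0
--     j = 0
--     out = []
--     while i < len(a) and j < len(b):
--         if a[i] <= b[j]:
--             out.append(a[i])
--             i += 1
--         else:
--             out.append(b[j])
--             j += 1
--     out.extend(a[i:])
--     out.extend(b[j:])
--     return out
--
--
-- def ranges_to_list(x, start=0, stop=None):
--     seqs = []
--     for xi in x:
--         xi = str(xi)
--         if xi.find('-') >= 0:
--             t = xi.split('-')
--             if len(t) != 2:
--                 raise ValueError('Invalid range!')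
--             lo = start if len(t[0]) == 0 else int(t[0])
--             hi = stop if len(t[1]) == 0 else int(t[1])
--             seqs.append(list(range(int(lo), int(hi) + 1)))
--         else:
--             seqs.append([int(xi)])
--     merged = []
--     for seq in seqs:
--         merged = _merge2(seq, merged)
--     out = []
--     prev = None
--     for v in merged:
--         if prev is None or v != prev:
--             out.append(v)
--         prev = v
--     return out
-- ===== Notes on version B (the rewrite author's own statement) =====
-- stated objective: alternative
-- what changed: A accumulates all values in a hash set and sorts it at the end; B parses each token into an already-sorted run (singleton or range), merges the sorted runs two-pointer-wise into one ascending stream and drops adjacent duplicates in a single pass, never building a set or calling sort.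
import Mathlib
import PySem

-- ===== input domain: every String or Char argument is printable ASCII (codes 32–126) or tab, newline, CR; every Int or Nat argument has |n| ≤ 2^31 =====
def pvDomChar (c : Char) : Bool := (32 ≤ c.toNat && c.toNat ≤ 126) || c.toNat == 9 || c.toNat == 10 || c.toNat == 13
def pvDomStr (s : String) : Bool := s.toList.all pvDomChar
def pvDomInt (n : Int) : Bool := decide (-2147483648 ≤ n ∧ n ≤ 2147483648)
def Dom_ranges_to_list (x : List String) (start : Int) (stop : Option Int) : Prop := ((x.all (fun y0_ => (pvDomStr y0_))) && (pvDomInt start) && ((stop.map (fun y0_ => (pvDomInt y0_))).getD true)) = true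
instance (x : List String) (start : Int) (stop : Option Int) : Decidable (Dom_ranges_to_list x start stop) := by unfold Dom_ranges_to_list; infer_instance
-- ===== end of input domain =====

-- B replaces A's hash-set accumulation + final sort by merging the already-sorted per-token
-- runs two-pointer-wise and dropping adjacent duplicates in one pass (objective: alternative).

-- ===== PORT A =====
-- A: fold the tokens into a set (singleton add or range union), then sorted(list(s)).
def ranges_to_list (x : List String) (start : Int) (stop : Option Int) : List Int :=
  let s : PySem.Set Int := x.foldl (fun s xi =>
    if PySem.Str.find xi "-" ≥ 0 then
      let t := (PySem.Str.split? xi "-").getD []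
      if t.length ≠ 2 then s   -- raise ValueError('Invalid range!'): outside Pre_
      else
        -- t[0]/t[1] substituted by start/stop when empty, then int(...) applied
        let lo : Int := if PySem.Str.len (t.getD 0 "") = 0 then start else (PySem.Int.ofStr? (t.getD 0 "")).getD 0
        let hi : Int := if PySem.Str.len (t.getD 1 "") = 0 then stop.getD 0 else (PySem.Int.ofStr? (t.getD 1 "")).getD 0
        PySem.Set.union s (PySem.Set.ofList (PySem.List.pyRange lo (hi + 1) 1))
    else PySem.Set.add s ((PySem.Int.ofStr? xi).getD 0)) PySem.Set.empty
  PySem.List.sorted s (fun v => v)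

-- ===== PORT B =====
-- two-pointer merge of two lists (_merge2 in Source B); the while loop as structural recursion
def pymerge : List Int → List Int → List Int
  | [], b => b
  | a, [] => a
  | a :: as_, b :: bs => if a ≤ b then a :: pymerge as_ (b :: bs) else b :: pymerge (a :: as_) bs
termination_by a b => a.length + b.length

def ranges_to_list_alt (x : List String) (start : Int) (stop : Option Int) : List Int :=
  -- pass 1: parse every token into a sorted run
  let seqs : List (List Int) := x.foldl (fun acc xi =>
    if PySem.Str.find xi "-" ≥ 0 then
      let t := (PySem.Str.split? xi "-").getD []
      if t.length ≠ 2 then acc   -- raise ValueError('Invalid range!'): outside Pre_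
      else
        let lo : Int := if PySem.Str.len (t.getD 0 "") = 0 then start else (PySem.Int.ofStr? (t.getD 0 "")).getD 0
        let hi : Int := if PySem.Str.len (t.getD 1 "") = 0 then stop.getD 0 else (PySem.Int.ofStr? (t.getD 1 "")).getD 0
        acc ++ [PySem.List.pyRange lo (hi + 1) 1]
    else acc ++ [[(PySem.Int.ofStr? xi).getD 0]]) []
  -- pass 2: merge the runs into one ascending stream
  let merged : List Int := seqs.foldl (fun m seq => pymerge seq m) []
  -- pass 3: emit each value only when it differs from the previous one
  (merged.foldl (fun (st : List Int × Option Int) v =>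
    (if st.2 = none ∨ some v ≠ st.2 then st.1 ++ [v] else st.1, some v)) ([], (none : Option Int))).1

-- ===== PRECONDITION & SPEC =====
-- Pre_ excludes exactly the tokens on which the Python raises: a dash token that does not split
-- into two pieces (ValueError), a non-empty side / plain token that is not an int literal
-- (ValueError), and an empty right side with stop=None (TypeError in int(None)).
def tokOK (stop : Option Int) (xi : String) : Bool :=
  if PySem.Str.find xi "-" ≥ 0 then
    let t := (PySem.Str.split? xi "-").getD []
    if t.length ≠ 2 then false
    else (PySem.Str.len (t.getD 0 "") == 0 || (PySem.Int.ofStr? (t.getD 0 "")).isSome)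
      && (if PySem.Str.len (t.getD 1 "") = 0 then stop.isSome else (PySem.Int.ofStr? (t.getD 1 "")).isSome)
  else (PySem.Int.ofStr? xi).isSome

def Pre_ranges_to_list (x : List String) (_start : Int) (stop : Option Int) : Prop :=
  x.all (tokOK stop) = true
instance (x : List String) (start : Int) (stop : Option Int) : Decidable (Pre_ranges_to_list x start stop) := by unfold Pre_ranges_to_list; infer_instance

def pvWitness_ranges_to_list : List String × Int × Option Int := (["1-3", "5", "-2"], 0, some 6)

def Spec_ranges_to_list (x : List String) (start : Int) (stop : Option Int) (out : List Int) : Prop := out = ranges_to_list_alt x start stop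
instance (x : List String) (start : Int) (stop : Option Int) (out : List Int) : Decidable (Spec_ranges_to_list x start stop out) := by unfold Spec_ranges_to_list; infer_instance

-- ===== CLAIM (what is proved, stated in full; the proofs are below) =====
def Claim_equal_ranges_to_list : Prop := ∀ (x : List String) (start : Int) (stop : Option Int), Dom_ranges_to_list x start stop → Pre_ranges_to_list x start stop → Spec_ranges_to_list x start stop (ranges_to_list x start stop)

-- ===== LEMMAS AND PROOFS =====

-- the integer values a single token contributes (same parse in both ports)
def tokVals (start : Int) (stop : Option Int) (xi : String) : List Int :=
  if PySem.Str.find xi "-" ≥ 0 then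
    let t := (PySem.Str.split? xi "-").getD []
    if t.length ≠ 2 then []
    else
      PySem.List.pyRange (if PySem.Str.len (t.getD 0 "") = 0 then start else (PySem.Int.ofStr? (t.getD 0 "")).getD 0)
        ((if PySem.Str.len (t.getD 1 "") = 0 then stop.getD 0 else (PySem.Int.ofStr? (t.getD 1 "")).getD 0) + 1) 1
  else [(PySem.Int.ofStr? xi).getD 0]

-- A's fold step / B's fold step, named for the proofs
def stepA (start : Int) (stop : Option Int) (s : PySem.Set Int) (xi : String) : PySem.Set Int :=
  if PySem.Str.find xi "-" ≥ 0 then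
    let t := (PySem.Str.split? xi "-").getD []
    if t.length ≠ 2 then s
    else
      let lo : Int := if PySem.Str.len (t.getD 0 "") = 0 then start else (PySem.Int.ofStr? (t.getD 0 "")).getD 0
      let hi : Int := if PySem.Str.len (t.getD 1 "") = 0 then stop.getD 0 else (PySem.Int.ofStr? (t.getD 1 "")).getD 0
      PySem.Set.union s (PySem.Set.ofList (PySem.List.pyRange lo (hi + 1) 1))
  else PySem.Set.add s ((PySem.Int.ofStr? xi).getD 0)

def tokSeqs (start : Int) (stop : Option Int) (xi : String) : List (List Int) :=
  if PySem.Str.find xi "-" ≥ 0 then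
    let t := (PySem.Str.split? xi "-").getD []
    if t.length ≠ 2 then []
    else
      [PySem.List.pyRange (if PySem.Str.len (t.getD 0 "") = 0 then start else (PySem.Int.ofStr? (t.getD 0 "")).getD 0)
        ((if PySem.Str.len (t.getD 1 "") = 0 then stop.getD 0 else (PySem.Int.ofStr? (t.getD 1 "")).getD 0) + 1) 1]
  else [[(PySem.Int.ofStr? xi).getD 0]]

lemma ranges_to_list_eq (x : List String) (start : Int) (stop : Option Int) :
    ranges_to_list x start stop
      = PySem.List.sorted (x.foldl (stepA start stop) PySem.Set.empty) (fun v => v) := rfl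

lemma stepA_nodup (start : Int) (stop : Option Int) (s : PySem.Set Int) (xi : String)
    (hs : List.Nodup s) : List.Nodup (stepA start stop s xi) := by
  unfold stepA
  dsimp only
  split
  · split
    · exact hs
    · exact PySem.Set.nodup_union _ _ hs
  · exact PySem.Set.nodup_add _ _ hs

lemma stepA_mem (start : Int) (stop : Option Int) (s : PySem.Set Int) (xi : String) (a : Int) :
    a ∈ stepA start stop s xi ↔ a ∈ s ∨ a ∈ tokVals start stop xi := by
  unfold stepA tokVals
  dsimp only
  split
  · split
    · simp
    · simp [PySem.Set.mem_union, PySem.Set.mem_ofList]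
  · simp [PySem.Set.mem_add]

lemma foldA_spec (start : Int) (stop : Option Int) (x : List String) (s : PySem.Set Int)
    (hs : List.Nodup s) :
    List.Nodup (x.foldl (stepA start stop) s) ∧
      (∀ a, a ∈ x.foldl (stepA start stop) s ↔ a ∈ s ∨ a ∈ x.flatMap (tokVals start stop)) := by
  induction x generalizing s with
  | nil => simp [hs]
  | cons xi t ih =>
    obtain ⟨h1, h2⟩ := ih (stepA start stop s xi) (stepA_nodup start stop s xi hs)
    refine ⟨h1, fun a => ?_⟩
    rw [List.foldl_cons, h2 a, stepA_mem]
    simp [or_assoc]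

-- B-side characterisations
lemma seqs_eq (x : List String) (start : Int) (stop : Option Int) :
    x.foldl (fun acc xi =>
      if PySem.Str.find xi "-" ≥ 0 then
        let t := (PySem.Str.split? xi "-").getD []
        if t.length ≠ 2 then acc
        else
          let lo : Int := if PySem.Str.len (t.getD 0 "") = 0 then start else (PySem.Int.ofStr? (t.getD 0 "")).getD 0
          let hi : Int := if PySem.Str.len (t.getD 1 "") = 0 then stop.getD 0 else (PySem.Int.ofStr? (t.getD 1 "")).getD 0
          acc ++ [PySem.List.pyRange lo (hi + 1) 1]
      else acc ++ [[(PySem.Int.ofStr? xi).getD 0]]) []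
      = x.flatMap (tokSeqs start stop) := by
  rw [PySem.List.foldl_congr_mem x _ (fun acc xi => acc ++ tokSeqs start stop xi) []
    (by
      intro acc xi _
      simp only [tokSeqs]
      split
      · split
        · simp
        · rfl
      · rfl)]
  simpa using PySem.List.foldl_append_eq_flatMap (tokSeqs start stop) x []

lemma flatten_tokSeqs (start : Int) (stop : Option Int) (xi : String) :
    (tokSeqs start stop xi).flatten = tokVals start stop xi := by
  unfold tokSeqs tokVals
  dsimp only
  split
  · split <;> simp
  · simp

lemma tokSeqs_sorted (start : Int) (stop : Option Int) (xi : String) :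
    ∀ l ∈ tokSeqs start stop xi, l.Pairwise (· ≤ ·) := by
  unfold tokSeqs
  dsimp only
  split
  · split
    · simp
    · intro l hl
      simp only [List.mem_singleton] at hl
      subst hl
      exact (PySem.List.pairwise_lt_pyRange_one _ _).imp le_of_lt
  · intro l hl
    simp only [List.mem_singleton] at hl
    subst hl
    simp

lemma pymerge_perm (a b : List Int) : (pymerge a b).Perm (a ++ b) := by
  unfold pymerge
  split
  · simp
  · simp
  · rename_i x as_ y bs
    split
    · simpa using (pymerge_perm as_ (y :: bs)).cons x
    · exact ((pymerge_perm (x :: as_) bs).cons y).trans (List.perm_middle.symm)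
termination_by a.length + b.length

lemma pymerge_mem (a b : List Int) (v : Int) : v ∈ pymerge a b ↔ v ∈ a ∨ v ∈ b := by
  rw [(pymerge_perm a b).mem_iff]; simp

lemma pymerge_pairwise (a b : List Int) (ha : a.Pairwise (· ≤ ·)) (hb : b.Pairwise (· ≤ ·)) :
    (pymerge a b).Pairwise (· ≤ ·) := by
  unfold pymerge
  split
  · exact hb
  · exact ha
  · rename_i x as_ y bs
    rw [List.pairwise_cons] at ha hb
    split
    · rename_i hxy
      rw [List.pairwise_cons]
      refine ⟨?_, pymerge_pairwise as_ (y :: bs) ha.2 (List.pairwise_cons.mpr hb)⟩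
      intro z hz
      rcases (pymerge_mem as_ (y :: bs) z).1 hz with h | h
      · exact ha.1 z h
      · rcases List.mem_cons.1 h with h | h
        · exact h ▸ hxy
        · exact le_trans hxy (hb.1 z h)
    · rename_i hxy
      push Not at hxy
      rw [List.pairwise_cons]
      refine ⟨?_, pymerge_pairwise (x :: as_) bs (List.pairwise_cons.mpr ha) hb.2⟩
      intro z hz
      rcases (pymerge_mem (x :: as_) bs z).1 hz with h | h
      · rcases List.mem_cons.1 h with h | h
        · exact h ▸ le_of_lt hxy
        · exact le_trans (le_of_lt hxy) (ha.1 z h)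
      · exact hb.1 z h
termination_by a.length + b.length

lemma mergedAll_spec (seqs : List (List Int)) (m : List Int)
    (hm : m.Pairwise (· ≤ ·)) (hseqs : ∀ l ∈ seqs, l.Pairwise (· ≤ ·)) :
    (seqs.foldl (fun m seq => pymerge seq m) m).Pairwise (· ≤ ·) ∧
      (∀ a, a ∈ seqs.foldl (fun m seq => pymerge seq m) m ↔ a ∈ m ∨ a ∈ seqs.flatten) := by
  induction seqs generalizing m with
  | nil => simp [hm]
  | cons seq t ih =>
    obtain ⟨h1, h2⟩ := ih (pymerge seq m)
      (pymerge_pairwise seq m (hseqs seq (by simp)) hm)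
      (fun l hl => hseqs l (by simp [hl]))
    refine ⟨h1, fun a => ?_⟩
    rw [List.foldl_cons, h2 a, pymerge_mem]
    simp [or_assoc, or_comm (a := a ∈ seq)]

-- adjacent-dup dropping after an element p already emitted
def dd : Int → List Int → List Int
  | _, [] => []
  | p, v :: t => if v = p then dd p t else v :: dd v t

lemma dd_spec (l : List Int) (p : Int) (h : (p :: l).Pairwise (· ≤ ·)) :
    (p :: dd p l).Pairwise (· < ·) ∧ (∀ a, a ∈ dd p l ↔ a ∈ l ∧ a ≠ p) := by
  induction l generalizing p with
  | nil => simp [dd]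
  | cons v t ih =>
    rw [List.pairwise_cons] at h
    have hpv : p ≤ v := h.1 v (by simp)
    by_cases hvp : v = p
    · subst hvp
      have h' : (v :: t).Pairwise (· ≤ ·) := by
        rw [List.pairwise_cons]
        exact ⟨fun z hz => h.1 z (by simp [hz]), (List.pairwise_cons.1 h.2).2⟩
      obtain ⟨ih1, ih2⟩ := ih v h'
      have hd : dd v (v :: t) = dd v t := by simp [dd]
      refine ⟨by rw [hd]; exact ih1, fun a => ?_⟩
      rw [hd, ih2 a]
      constructor
      · rintro ⟨ha, hne⟩; exact ⟨List.mem_cons_of_mem _ ha, hne⟩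
      · rintro ⟨ha, hne⟩
        rcases List.mem_cons.1 ha with h2 | h2
        · exact absurd h2 hne
        · exact ⟨h2, hne⟩
    · have hlt : p < v := lt_of_le_of_ne hpv (fun e => hvp e.symm)
      obtain ⟨ih1, ih2⟩ := ih v h.2
      have hvt : ∀ z ∈ t, v ≤ z := (List.pairwise_cons.1 h.2).1
      refine ⟨?_, fun a => ?_⟩
      · simp only [dd, if_neg hvp]
        rw [List.pairwise_cons]
        refine ⟨?_, ih1⟩
        intro z hz
        rcases List.mem_cons.1 hz with h | h
        · exact h ▸ hlt
        · exact lt_of_lt_of_le hlt (hvt z ((ih2 z).1 h).1)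
      · simp only [dd, if_neg hvp, List.mem_cons, ih2]
        constructor
        · rintro (rfl | ⟨hz, hne⟩)
          · exact ⟨Or.inl rfl, fun e => hvp e⟩
          · exact ⟨Or.inr hz, fun e => absurd rfl (e ▸ (lt_of_lt_of_le hlt (hvt a hz)).ne')⟩
        · rintro ⟨(rfl | hz), hne⟩
          · exact Or.inl rfl
          · by_cases hav : a = v
            · exact Or.inl hav
            · exact Or.inr ⟨hz, hav⟩

lemma foldl_dd (l out : List Int) (p : Int) :
    (l.foldl (fun (st : List Int × Option Int) v =>
      (if st.2 = none ∨ some v ≠ st.2 then st.1 ++ [v] else st.1, some v)) (out, some p)).1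
      = out ++ dd p l := by
  induction l generalizing out p with
  | nil => simp [dd]
  | cons v t ih =>
    by_cases hvp : v = p
    · subst hvp
      simp only [dd, List.foldl_cons]
      simpa using ih out v
    · simp only [dd, if_neg hvp, List.foldl_cons]
      have : ((some p = none ∨ some v ≠ some p)) := Or.inr (by simpa using hvp)
      rw [if_pos this]
      simpa using ih (out ++ [v]) v

lemma alt_eq (x : List String) (start : Int) (stop : Option Int) :
    ranges_to_list_alt x start stop
      = match (x.flatMap (tokSeqs start stop)).foldl (fun m seq => pymerge seq m) [] with
        | [] => []
        | v :: t => v :: dd v t := by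
  simp only [ranges_to_list_alt]
  rw [seqs_eq]
  generalize (x.flatMap (tokSeqs start stop)).foldl (fun m seq => pymerge seq m) [] = m
  cases m with
  | nil => rfl
  | cons v t =>
    have h := foldl_dd t [v] v
    simp only [List.foldl_cons]
    simpa using h

-- ===== VERDICT (by name: the statement is the Claim_ definition above) =====
theorem ranges_to_list_spec : Claim_equal_ranges_to_list := by
  intro x start stop _ _
  unfold Spec_ranges_to_list
  rw [ranges_to_list_eq, alt_eq]
  obtain ⟨hsnd, hsmem⟩ := foldA_spec start stop x PySem.Set.empty (by simp [PySem.Set.empty])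
  obtain ⟨hmp, hmm⟩ := mergedAll_spec (x.flatMap (tokSeqs start stop)) []
    (by simp) (by
      intro l hl
      rcases List.mem_flatMap.1 hl with ⟨xi, _, hxl⟩
      exact tokSeqs_sorted start stop xi l hxl)
  have hmemflat : ∀ a : Int, a ∈ (x.flatMap (tokSeqs start stop)).flatten
      ↔ a ∈ x.flatMap (tokVals start stop) := by
    intro a
    simp only [List.mem_flatten, List.mem_flatMap]
    constructor
    · rintro ⟨l, ⟨xi, hxi, hl⟩, hal⟩
      exact ⟨xi, hxi, (flatten_tokSeqs start stop xi) ▸ List.mem_flatten.2 ⟨l, hl, hal⟩⟩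
    · rintro ⟨xi, hxi, ha⟩
      rcases List.mem_flatten.1 ((flatten_tokSeqs start stop xi) ▸ ha) with ⟨l, hl, hal⟩
      exact ⟨l, ⟨xi, hxi, hl⟩, hal⟩
  have hS : ∀ a : Int, a ∈ x.foldl (stepA start stop) PySem.Set.empty
      ↔ a ∈ x.flatMap (tokVals start stop) := by
    intro a
    rw [hsmem a]
    simp [PySem.Set.empty]
  cases hm : (x.flatMap (tokSeqs start stop)).foldl (fun m seq => pymerge seq m) [] with
  | nil =>
    have hSempty : x.foldl (stepA start stop) PySem.Set.empty = [] := by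
      rw [List.eq_nil_iff_forall_not_mem]
      intro a ha
      have := (hmm a).2 (Or.inr ((hmemflat a).2 ((hS a).1 ha)))
      rw [hm] at this
      simp at this
    rw [hSempty]
    simp [PySem.List.sorted]
  | cons v t =>
    have hvt : (v :: t).Pairwise (· ≤ ·) := hm ▸ hmp
    obtain ⟨hpw, hdmem⟩ := dd_spec t v hvt
    have hysmem : ∀ a : Int, a ∈ v :: dd v t ↔ a ∈ v :: t := by
      intro a
      simp only [List.mem_cons, hdmem a]
      constructor
      · rintro (rfl | ⟨h, _⟩)
        · exact Or.inl rfl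
        · exact Or.inr h
      · rintro (rfl | h)
        · exact Or.inl rfl
        · by_cases hav : a = v
          · exact Or.inl hav
          · exact Or.inr ⟨h, hav⟩
    have hysnodup : (v :: dd v t).Nodup := hpw.imp (fun h => ne_of_lt h)
    apply PySem.List.sorted_eq_of_perm_of_pairwise_lt _ _ (fun v => v) _ hpw
    rw [List.perm_ext_iff_of_nodup hysnodup hsnd]
    intro a
    rw [hysmem a, hS a, ← hmemflat a]
    have h2 := hmm a
    rw [hm] at h2
    simp only [List.not_mem_nil, false_or] at h2
    exact h2
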